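-- pv_equiv track=rewrite | github.com/amar1323/fromC-toJsAndPy | problems/easy/760.FindAnagramMappings/python/main.py | anagramMappings
-- ===== SOURCE A (Python) =====
-- from typing import List
--
-- def anagramMappings(nums1:List[int], nums2:List[int])->List[int]:
--     m1 = {}
--     m2 = {}
--     for i in range(len(nums1)):
--         if nums1[i] not in m1:
--             m1[nums1[i]] = [i]
--         else:
--             m1[nums1[i]].append(i)
--         if nums2[i] not in m2:
--             m2[nums2[i]] = [i]
--         else:
--             m2[nums2[i]].append(i)
--     ret = [None] * len(nums1)
--     for i in range(len(ret)):
--         ret[m1[nums1[i]].pop()] = m2[nums1[i]].pop()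
--     return ret
-- ===== SOURCE B (Python) =====
-- from collections import defaultdict, deque
-- from typing import List
--
-- def anagramMappings(nums1: List[int], nums2: List[int]) -> List[int]:
--     positions = defaultdict(deque)
--     for i, v in enumerate(nums2):
--         positions[v].append(i)
--     return [positions[v].popleft() for v in nums1]
-- ===== Notes on version B (the rewrite author's own statement) =====
-- stated objective: simpler
-- what changed: A builds two per-value index-stack dicts (for nums1 and nums2), preallocates a [None]*n result and fills it by a scatter loop popping the backs of both stacks; B builds one value-to-index-FIFO dict over nums2 and emits the result directly in one pass over nums1, popping each value's earliest unused index from the front, which halves the dict work and drops the scatter pass (constant-factor speedup).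
import Mathlib
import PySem

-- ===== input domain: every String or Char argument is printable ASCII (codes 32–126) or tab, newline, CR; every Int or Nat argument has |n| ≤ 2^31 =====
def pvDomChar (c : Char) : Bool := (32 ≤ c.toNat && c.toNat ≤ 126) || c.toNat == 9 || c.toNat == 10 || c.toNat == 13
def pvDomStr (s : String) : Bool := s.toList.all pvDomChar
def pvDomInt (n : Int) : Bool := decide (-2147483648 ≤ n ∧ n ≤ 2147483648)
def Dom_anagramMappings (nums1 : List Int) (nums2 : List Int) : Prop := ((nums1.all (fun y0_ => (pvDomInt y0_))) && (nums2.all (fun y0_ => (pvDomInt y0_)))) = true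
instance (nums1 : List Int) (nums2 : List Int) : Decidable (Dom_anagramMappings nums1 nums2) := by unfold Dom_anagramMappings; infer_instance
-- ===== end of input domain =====

-- B replaces A's two per-value index-stack dicts, [None]*n preallocation and double-pop
-- scatter loop by one value→index-FIFO dict over nums2 and a direct pass over nums1 (simpler).

-- ===== PORT A =====
-- first loop of A: build m1 (indices of each value in nums1) and m2 (indices in nums2);
-- pyGet? models the IndexError on nums2[i] when nums2 is shorter
def aStep1 (nums1 : List Int) (nums2 : List Int)
    (st : Option (PySem.Dict Int (List Int) × PySem.Dict Int (List Int))) (i : Int) :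
    Option (PySem.Dict Int (List Int) × PySem.Dict Int (List Int)) :=
  st.bind fun st =>
    (PySem.List.pyGet? nums1 i).bind fun a =>
    (PySem.List.pyGet? nums2 i).bind fun b =>
    let m1 := if (PySem.Dict.contains st.1 a) = false then st.1.insert a [i]
              else st.1.modify a [] (· ++ [i])
    let m2 := if (PySem.Dict.contains st.2 b) = false then st.2.insert b [i]
              else st.2.modify b [] (· ++ [i])
    some (m1, m2)

-- second loop of A: ret[m1[nums1[i]].pop()] = m2[nums1[i]].pop();
-- get? models the KeyError, pop? the IndexError on an empty list, pySet? the assignment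
def aStep2 (nums1 : List Int)
    (st : Option (PySem.Dict Int (List Int) × PySem.Dict Int (List Int) × List (Option Int)))
    (i : Int) :
    Option (PySem.Dict Int (List Int) × PySem.Dict Int (List Int) × List (Option Int)) :=
  st.bind fun st =>
    (PySem.List.pyGet? nums1 i).bind fun v =>
    (PySem.Dict.get? st.2.1 v).bind fun l2 =>
    (PySem.List.pop? l2).bind fun p2 =>
    (PySem.Dict.get? st.1 v).bind fun l1 =>
    (PySem.List.pop? l1).bind fun p1 =>
    (PySem.List.pySet? st.2.2 p1.1 (some p2.1)).bind fun ret =>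
    some (st.1.insert v p1.2, st.2.1.insert v p2.2, ret)

def anagramMappings (nums1 : List Int) (nums2 : List Int) : List Int :=
  match (PySem.List.pyRange 0 (nums1.length : Int) 1).foldl (aStep1 nums1 nums2)
      (some (PySem.Dict.empty, PySem.Dict.empty)) with
  | none => []                                   -- Python raised (outside Pre_)
  | some st =>
    let ret : List (Option Int) := List.replicate nums1.length none   -- [None] * len(nums1)
    match (PySem.List.pyRange 0 (ret.length : Int) 1).foldl (aStep2 nums1) (some (st.1, st.2, ret)) with
    | none => []                                 -- Python raised (outside Pre_)
    | some st => st.2.2.map (fun o => o.getD 0)  -- under Pre_ every slot was assigned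

-- ===== PORT B =====
-- positions = defaultdict(deque); for i, v in enumerate(nums2): positions[v].append(i)
def bBuild (nums2 : List Int) : PySem.Dict Int (List Int) :=
  (PySem.List.enumerate nums2).foldl (fun d p => d.modify p.2 [] (· ++ [p.1])) PySem.Dict.empty

-- one step of the comprehension: popleft() from positions[v] (none = IndexError on empty deque)
def bStep (st : Option (PySem.Dict Int (List Int) × List Int)) (v : Int) :
    Option (PySem.Dict Int (List Int) × List Int) :=
  st.bind fun st =>
    match PySem.Dict.getD st.1 v [] with
    | [] => none
    | x :: rest => some (st.1.insert v rest, st.2 ++ [x])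

def anagramMappings_alt (nums1 : List Int) (nums2 : List Int) : List Int :=
  match nums1.foldl bStep (some (bBuild nums2, [])) with
  | none => []                                   -- Python raised (outside Pre_)
  | some st => st.2

-- ===== PRECONDITION & SPEC =====
-- Pre_ holds exactly on the inputs where the Python A returns normally: A raises
-- (IndexError/KeyError/pop from empty list) precisely when nums1 is not a permutation
-- of nums2 truncated to len(nums1); nothing on which A returns is excluded.
def Pre_anagramMappings (nums1 : List Int) (nums2 : List Int) : Prop :=
  (nums2.take nums1.length).Perm nums1
instance (nums1 : List Int) (nums2 : List Int) : Decidable (Pre_anagramMappings nums1 nums2) := by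
  unfold Pre_anagramMappings; infer_instance

def pvWitness_anagramMappings : List Int × List Int := ([1, 2, 2], [2, 1, 2])

def Spec_anagramMappings (nums1 : List Int) (nums2 : List Int) (out : List Int) : Prop :=
  out = anagramMappings_alt nums1 nums2
instance (nums1 : List Int) (nums2 : List Int) (out : List Int) :
    Decidable (Spec_anagramMappings nums1 nums2 out) := by unfold Spec_anagramMappings; infer_instance

-- ===== CLAIM (what is proved, stated in full; the proofs are below) =====
def Claim_equal_anagramMappings : Prop := ∀ (nums1 : List Int) (nums2 : List Int), Dom_anagramMappings nums1 nums2 → Pre_anagramMappings nums1 nums2 → Spec_anagramMappings nums1 nums2 (anagramMappings nums1 nums2)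


-- ===== LEMMAS AND PROOFS =====

-- occIdx v l k = the indices (offset by k) at which v occurs in l, in increasing order
def occIdx (v : Int) : List Int → Int → List Int
  | [], _ => []
  | x :: xs, k => if x = v then k :: occIdx v xs (k + 1) else occIdx v xs (k + 1)

-- the common value both programs compute: position j of l is sent to the
-- (number of earlier occurrences of l[j])-th index of l[j] in l2
def canon (l2 : List Int) : List Int → List Int → List Int
  | _, [] => []
  | pre, v :: rest =>
    PySem.List.pyGetD (occIdx v l2 0) ((pre.count v : Nat) : Int) 0 :: canon l2 (pre ++ [v]) rest

theorem occIdx_length (v : Int) (l : List Int) (k : Int) :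
    (occIdx v l k).length = l.count v := by
  induction l generalizing k with
  | nil => simp [occIdx]
  | cons x xs ih =>
    by_cases h : x = v <;> simp [occIdx, h, ih]

theorem occIdx_append (v : Int) (l l' : List Int) (k : Int) :
    occIdx v (l ++ l') k = occIdx v l k ++ occIdx v l' (k + l.length) := by
  induction l generalizing k with
  | nil => simp [occIdx]
  | cons x xs ih =>
    by_cases h : x = v <;>
      simp [occIdx, h, ih, add_assoc] <;> ring_nf

theorem occIdx_getElem (v : Int) (l : List Int) (k : Int) (r : Nat)
    (hr : r < (occIdx v l k).length) :
    ∃ (p : Nat) (hp : p < l.length), (occIdx v l k)[r] = k + p ∧ l[p] = v ∧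
      (l.take p).count v = r := by
  induction l generalizing k r with
  | nil => simp [occIdx] at hr
  | cons x xs ih =>
    by_cases h : x = v
    · subst h
      have hocc : occIdx x (x :: xs) k = k :: occIdx x xs (k + 1) := by simp [occIdx]
      cases r with
      | zero => exact ⟨0, by simp, by simp [hocc], by simp, by simp⟩
      | succ r =>
        rw [hocc] at hr
        obtain ⟨p, hp, h1, h2, h3⟩ := ih (k + 1) r (by simpa using hr)
        refine ⟨p + 1, by simpa using hp, ?_, by simpa using h2,
          by simp [List.take_succ_cons, h3]⟩
        simp only [hocc, List.getElem_cons_succ]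
        rw [h1]; push_cast; ring
    · have hocc : occIdx v (x :: xs) k = occIdx v xs (k + 1) := by simp [occIdx, h]
      rw [hocc] at hr
      obtain ⟨p, hp, h1, h2, h3⟩ := ih (k + 1) r hr
      have h' : ¬ v = x := fun e => h e.symm
      refine ⟨p + 1, by simpa using hp, ?_, by simpa using h2,
        by simp [List.take_succ_cons, h, h3]⟩
      simp only [hocc]
      rw [h1]; push_cast; ring

theorem occIdx_rank (l : List Int) (p : Nat) (hp : p < l.length) (k : Int) :
    ∃ hr : (l.take p).count l[p] < (occIdx l[p] l k).length,
      (occIdx l[p] l k)[(l.take p).count l[p]] = k + p := by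
  induction l generalizing p k with
  | nil => simp at hp
  | cons x xs ih =>
    cases p with
    | zero => exact ⟨by simp [occIdx], by simp [occIdx]⟩
    | succ p =>
      have hp' : p < xs.length := by simpa using hp
      obtain ⟨hr, he⟩ := ih p hp' (k + 1)
      simp only [List.getElem_cons_succ, List.take_succ_cons]
      by_cases h : x = xs[p]
      · have hocc : occIdx xs[p] (x :: xs) k = k :: occIdx xs[p] xs (k + 1) := by
          simp [occIdx, h]
        have hcnt : (x :: xs.take p).count xs[p] = (xs.take p).count xs[p] + 1 := by
          simp [h]
        simp only [hocc, hcnt, List.getElem_cons_succ]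
        refine ⟨by simpa using Nat.succ_lt_succ hr, ?_⟩
        rw [he]; push_cast; ring
      · have h' : ¬ xs[p] = x := fun e => h e.symm
        have hocc : occIdx xs[p] (x :: xs) k = occIdx xs[p] xs (k + 1) := by
          simp [occIdx, h]
        have hcnt : (x :: xs.take p).count xs[p] = (xs.take p).count xs[p] := by
          simp [h]
        simp only [hocc, hcnt]
        refine ⟨hr, ?_⟩
        rw [he]; push_cast; ring

theorem occIdx_eq_enum (v : Int) (l : List Int) (k : Int) :
    ((((PySem.List.enumerate l k).map Prod.swap).filter (fun q => q.1 == v)).map (fun q => q.2))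
      = occIdx v l k := by
  induction l generalizing k with
  | nil => simp [PySem.List.enumerate_nil, occIdx]
  | cons x xs ih =>
    by_cases h : x = v <;>
      simp [PySem.List.enumerate_cons, occIdx, h, ih]

theorem bBuild_getD (l : List Int) (v : Int) :
    (bBuild l).getD v [] = occIdx v l 0 := by
  unfold bBuild
  have heq : (PySem.List.enumerate l).foldl
        (fun (d : PySem.Dict Int (List Int)) (p : Int × Int) => d.modify p.2 [] (· ++ [p.1]))
        PySem.Dict.empty
      = ((PySem.List.enumerate l).map Prod.swap).foldl
        (fun (d : PySem.Dict Int (List Int)) (q : Int × Int) => d.modify q.1 [] (· ++ [q.2]))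
        PySem.Dict.empty :=
    by rw [List.foldl_map]; rfl
  rw [heq, PySem.Dict.getD_foldl_modify_append]
  simpa using occIdx_eq_enum v l 0

theorem bBuild_get? (l : List Int) (v : Int) (hv : v ∈ l) :
    (bBuild l).get? v = some (occIdx v l 0) := by
  have hne : occIdx v l 0 ≠ [] := by
    have : (occIdx v l 0).length = l.count v := occIdx_length v l 0
    have hcp : 0 < l.count v := List.count_pos_iff.mpr hv
    intro he; rw [he] at this; simp at this; omega
  have hgd := bBuild_getD l v
  by_cases hc : (bBuild l).contains v
  · cases hget : (bBuild l).get? v with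
    | none =>
      rw [PySem.Dict.contains_eq_isSome_get?, hget] at hc; simp at hc
    | some w =>
      have := PySem.Dict.getD_of_get?_eq_some (bBuild l) ([] : List Int) hget
      rw [← this, hgd]
  · exact absurd (by rw [← hgd]; exact PySem.Dict.getD_of_not_contains _ _ (by simpa using hc)) hne

theorem dict_branch_eq (d : PySem.Dict Int (List Int)) (a : Int) (i : Int) :
    (if d.contains a = false then d.insert a [i] else d.modify a [] (· ++ [i]))
      = d.modify a [] (· ++ [i]) := by
  by_cases h : d.contains a
  · simp [h]
  · have h' : d.contains a = false := by simpa using h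
    simp [h', PySem.Dict.modify, PySem.Dict.getD_of_not_contains _ _ h']

theorem bBuild_take_succ (l : List Int) (m : Nat) (hm : m < l.length) :
    bBuild (l.take (m + 1)) = (bBuild (l.take m)).modify l[m] [] (· ++ [(m : Int)]) := by
  rw [List.take_add_one, List.getElem?_eq_getElem hm, Option.toList_some,
    show bBuild (l.take m ++ [l[m]]) = bBuild (l.take m ++ [l[m]]) from rfl]
  unfold bBuild
  rw [PySem.List.enumerate_append, List.foldl_append]
  simp [List.length_take, Nat.min_eq_left (Nat.le_of_lt hm), PySem.List.enumerate_cons,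
    PySem.List.enumerate_nil]

theorem A_build (nums1 nums2 : List Int) (h2 : nums1.length ≤ nums2.length)
    (m : Nat) (hm : m ≤ nums1.length) :
    (PySem.List.pyRange 0 (m : Int) 1).foldl (aStep1 nums1 nums2)
        (some (PySem.Dict.empty, PySem.Dict.empty))
      = some (bBuild (nums1.take m), bBuild (nums2.take m)) := by
  induction m with
  | zero =>
    simp only [Nat.cast_zero, List.take_zero]
    rfl
  | succ m ih =>
    have hm' : m ≤ nums1.length := Nat.le_of_succ_le hm
    have hm1 : m < nums1.length := hm
    have hm2 : m < nums2.length := Nat.lt_of_lt_of_le hm1 h2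
    have hc : ((m + 1 : Nat) : Int) = (m : Int) + 1 := by push_cast; ring
    rw [hc, PySem.List.pyRange_one_succ_right (by positivity), List.foldl_append, ih hm']
    simp only [List.foldl_cons, List.foldl_nil]
    rw [bBuild_take_succ nums1 m hm1, bBuild_take_succ nums2 m hm2]
    simp only [aStep1, Option.bind_some, PySem.List.pyGet?_natCast,
      List.getElem?_eq_getElem hm1, List.getElem?_eq_getElem hm2, Option.bind_some,
      dict_branch_eq]

theorem A_loop (l1 l2 : List Int) (hcnt : ∀ v, l2.count v = l1.count v)
    (m : Nat) (hm : m ≤ l1.length) :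
    ∃ d1 d2 r,
      (PySem.List.pyRange 0 (m : Int) 1).foldl (aStep2 l1)
          (some (bBuild l1, bBuild l2, List.replicate l1.length (none : Option Int)))
        = some (d1, d2, r) ∧
      (∀ v ∈ l1, d1.get? v = some ((occIdx v l1 0).take (l1.count v - (l1.take m).count v))) ∧
      (∀ v ∈ l1, d2.get? v = some ((occIdx v l2 0).take (l1.count v - (l1.take m).count v))) ∧
      r.length = l1.length ∧
      (∀ (j : Nat) (hj : j < l1.length),
        r[j]? = some (if l1.count l1[j] - (l1.take m).count l1[j] ≤ (l1.take j).count l1[j]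
          then some (PySem.List.pyGetD (occIdx l1[j] l2 0) (((l1.take j).count l1[j] : Nat) : Int) 0)
          else none)) := by
  have hrank_lt : ∀ (j : Nat) (hj : j < l1.length), (l1.take j).count l1[j] < l1.count l1[j] := by
    intro j hj
    obtain ⟨hr, _⟩ := occIdx_rank l1 j hj 0
    rwa [occIdx_length] at hr
  induction m with
  | zero =>
    refine ⟨bBuild l1, bBuild l2, List.replicate l1.length none, ?_, ?_, ?_, by simp, ?_⟩
    · have h0 : PySem.List.pyRange 0 ((0 : Nat) : Int) 1 = [] := by decide
      rw [h0, List.foldl_nil]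
    · intro v hv
      rw [bBuild_get? l1 v hv]
      have : l1.count v - (l1.take 0).count v = (occIdx v l1 0).length := by
        rw [occIdx_length]; simp
      rw [this, List.take_length]
    · intro v hv
      have hv2 : v ∈ l2 := by
        have h1 : 0 < l1.count v := List.count_pos_iff.mpr hv
        have h2 := hcnt v
        exact List.count_pos_iff.mp (by omega)
      rw [bBuild_get? l2 v hv2]
      have : l1.count v - (l1.take 0).count v = (occIdx v l2 0).length := by
        rw [occIdx_length, hcnt]; simp
      rw [this, List.take_length]
    · intro j hj
      rw [List.getElem?_replicate, if_pos hj]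
      have h1 := hrank_lt j hj
      rw [if_neg (by simp; omega)]
  | succ m ih =>
    have hm' : m ≤ l1.length := Nat.le_of_succ_le hm
    have hm1 : m < l1.length := hm
    obtain ⟨d1, d2, r, hfold, hd1, hd2, hrlen, hr⟩ := ih hm'
    have hc : ((m + 1 : Nat) : Int) = (m : Int) + 1 := by push_cast; ring
    rw [hc, PySem.List.pyRange_one_succ_right (by positivity), List.foldl_append, hfold,
      List.foldl_cons, List.foldl_nil]
    -- notation
    have hv : l1[m] ∈ l1 := List.getElem_mem hm1
    have hs : (l1.take m).count l1[m] < l1.count l1[m] := hrank_lt m hm1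
    have hlen1 : (occIdx l1[m] l1 0).length = l1.count l1[m] := occIdx_length _ _ _
    have hlen2 : (occIdx l1[m] l2 0).length = l1.count l1[m] := by
      rw [occIdx_length, hcnt]
    have hidx : l1.count l1[m] - (l1.take m).count l1[m]
        = (l1.count l1[m] - (l1.take m).count l1[m] - 1) + 1 := by omega
    have hi1 : l1.count l1[m] - (l1.take m).count l1[m] - 1 < (occIdx l1[m] l1 0).length := by
      omega
    have hi2 : l1.count l1[m] - (l1.take m).count l1[m] - 1 < (occIdx l1[m] l2 0).length := by
      omega
    have htk1 : (occIdx l1[m] l1 0).take (l1.count l1[m] - (l1.take m).count l1[m])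
        = (occIdx l1[m] l1 0).take (l1.count l1[m] - (l1.take m).count l1[m] - 1)
          ++ [(occIdx l1[m] l1 0)[l1.count l1[m] - (l1.take m).count l1[m] - 1]] := by
      conv_lhs => rw [hidx]
      rw [List.take_add_one, List.getElem?_eq_getElem hi1, Option.toList_some]
    have htk2 : (occIdx l1[m] l2 0).take (l1.count l1[m] - (l1.take m).count l1[m])
        = (occIdx l1[m] l2 0).take (l1.count l1[m] - (l1.take m).count l1[m] - 1)
          ++ [(occIdx l1[m] l2 0)[l1.count l1[m] - (l1.take m).count l1[m] - 1]] := by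
      conv_lhs => rw [hidx]
      rw [List.take_add_one, List.getElem?_eq_getElem hi2, Option.toList_some]
    have hpop1 : PySem.List.pop? ((occIdx l1[m] l1 0).take
          (l1.count l1[m] - (l1.take m).count l1[m]))
        = some ((occIdx l1[m] l1 0)[l1.count l1[m] - (l1.take m).count l1[m] - 1],
            (occIdx l1[m] l1 0).take (l1.count l1[m] - (l1.take m).count l1[m] - 1)) := by
      rw [htk1]; exact PySem.List.pop?_last _ _
    have hpop2 : PySem.List.pop? ((occIdx l1[m] l2 0).take
          (l1.count l1[m] - (l1.take m).count l1[m]))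
        = some ((occIdx l1[m] l2 0)[l1.count l1[m] - (l1.take m).count l1[m] - 1],
            (occIdx l1[m] l2 0).take (l1.count l1[m] - (l1.take m).count l1[m] - 1)) := by
      rw [htk2]; exact PySem.List.pop?_last _ _
    obtain ⟨p, hp, hpe, hpv, hprank⟩ := occIdx_getElem l1[m] l1 0
      (l1.count l1[m] - (l1.take m).count l1[m] - 1) hi1
    rw [zero_add] at hpe
    have hset : PySem.List.pySet? r ((occIdx l1[m] l1 0)[l1.count l1[m] - (l1.take m).count l1[m] - 1])
          (some ((occIdx l1[m] l2 0)[l1.count l1[m] - (l1.take m).count l1[m] - 1]))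
        = some (r.set p (some ((occIdx l1[m] l2 0)[l1.count l1[m] - (l1.take m).count l1[m] - 1]))) := by
      rw [hpe]
      exact PySem.List.pySet?_natCast r p _ (by rw [hrlen]; exact hp)
    have hstep : aStep2 l1 (some (d1, d2, r)) (m : Int)
        = some (d1.insert l1[m] ((occIdx l1[m] l1 0).take
              (l1.count l1[m] - (l1.take m).count l1[m] - 1)),
            d2.insert l1[m] ((occIdx l1[m] l2 0).take
              (l1.count l1[m] - (l1.take m).count l1[m] - 1)),
            r.set p (some ((occIdx l1[m] l2 0)[l1.count l1[m] - (l1.take m).count l1[m] - 1]))) := by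
      simp only [aStep2, Option.bind_some, PySem.List.pyGet?_natCast,
        List.getElem?_eq_getElem hm1, Option.bind_some, hd2 l1[m] hv, hpop2,
        hd1 l1[m] hv, hpop1, hset]
    rw [hstep]
    have hcnt_succ : ∀ w, (l1.take (m + 1)).count w
        = (l1.take m).count w + (if w = l1[m] then 1 else 0) := by
      intro w
      rw [List.take_add_one, List.getElem?_eq_getElem hm1, Option.toList_some, List.count_append]
      by_cases hw : w = l1[m]
      · subst hw; simp
      · have h2 : ¬ l1[m] = w := fun e => hw e.symm
        simp [h2, hw]
    refine ⟨_, _, _, rfl, ?_, ?_, by rwa [List.length_set], ?_⟩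
    · intro w hw
      rw [PySem.Dict.get?_insert]
      by_cases hwv : w = l1[m]
      · rw [if_pos hwv, hwv]
        have hx : l1.count l1[m] - (l1.take (m + 1)).count l1[m]
            = l1.count l1[m] - (l1.take m).count l1[m] - 1 := by
          rw [hcnt_succ, if_pos rfl]; omega
        rw [hx]
      · rw [if_neg hwv, hd1 w hw, hcnt_succ, if_neg hwv, Nat.add_zero]
    · intro w hw
      rw [PySem.Dict.get?_insert]
      by_cases hwv : w = l1[m]
      · rw [if_pos hwv, hwv]
        have hx : l1.count l1[m] - (l1.take (m + 1)).count l1[m]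
            = l1.count l1[m] - (l1.take m).count l1[m] - 1 := by
          rw [hcnt_succ, if_pos rfl]; omega
        rw [hx]
      · rw [if_neg hwv, hd2 w hw, hcnt_succ, if_neg hwv, Nat.add_zero]
    · intro j hj
      rw [List.getElem?_set]
      by_cases hjp : p = j
      · subst hjp
        rw [if_pos rfl, if_pos (by rw [hrlen]; exact hp)]
        have hcond : l1.count l1[p] - (l1.take (m + 1)).count l1[p] ≤ (l1.take p).count l1[p] := by
          rw [hpv, hcnt_succ, if_pos rfl, hprank]
          omega
        rw [if_pos hcond]
        have hgetd : PySem.List.pyGetD (occIdx l1[p] l2 0) (((l1.take p).count l1[p] : Nat) : Int) 0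
            = (occIdx l1[m] l2 0)[l1.count l1[m] - (l1.take m).count l1[m] - 1] := by
          rw [hpv, hprank, PySem.List.pyGetD_natCast, List.getD_eq_getElem _ _ hi2]
        rw [hgetd]
      · rw [if_neg hjp, hr j hj]
        by_cases hw : l1[j] = l1[m]
        · have hrj : (l1.take j).count l1[j] ≠ l1.count l1[m] - (l1.take m).count l1[m] - 1 := by
            intro he
            obtain ⟨hrj1, hrj2⟩ := occIdx_rank l1 j hj 0
            rw [hw] at he
            simp only [hw, he] at hrj2
            rw [hpe] at hrj2
            have hpj : p = j := by omega
            exact hjp hpj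
          have hiff : (l1.count l1[j] - (l1.take (m + 1)).count l1[j] ≤ (l1.take j).count l1[j])
              ↔ (l1.count l1[j] - (l1.take m).count l1[j] ≤ (l1.take j).count l1[j]) := by
            rw [hw, hcnt_succ, if_pos rfl]
            rw [hw] at hrj
            omega
          simp only [hiff]
        · have : (l1.take (m + 1)).count l1[j] = (l1.take m).count l1[j] := by
            rw [hcnt_succ, if_neg hw, Nat.add_zero]
          rw [this]

theorem canon_length (l2 : List Int) (l pre : List Int) : (canon l2 pre l).length = l.length := by
  induction l generalizing pre with
  | nil => simp [canon]
  | cons v rest ih => simp [canon, ih]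

theorem canon_getElem (l2 : List Int) (l : List Int) (pre : List Int) (j : Nat)
    (hj : j < l.length) :
    (canon l2 pre l)[j]'(by rw [canon_length]; exact hj)
      = PySem.List.pyGetD (occIdx l[j] l2 0)
          ((pre.count l[j] + (l.take j).count l[j] : Nat) : Int) 0 := by
  induction l generalizing pre j with
  | nil => simp at hj
  | cons v rest ih =>
    cases j with
    | zero => simp [canon]
    | succ j =>
      have hj' : j < rest.length := by simpa using hj
      have := ih (pre ++ [v]) j hj'
      simp only [canon, List.getElem_cons_succ, List.take_succ_cons, List.count_cons,
        List.count_append] at this ⊢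
      rw [this]
      congr 1
      simp
      omega

theorem B_loop (l2 : List Int) (rest : List Int) :
    ∀ (pre : List Int) (d : PySem.Dict Int (List Int)) (out : List Int),
    (∀ v, (pre ++ rest).count v ≤ l2.count v) →
    (∀ v, d.getD v [] = (occIdx v l2 0).drop (pre.count v)) →
    ∃ d', rest.foldl bStep (some (d, out)) = some (d', out ++ canon l2 pre rest) := by
  induction rest with
  | nil => exact fun pre d out _ _ => ⟨d, by simp [canon]⟩
  | cons v rest ih =>
    intro pre d out hcnt hd
    have hlt : pre.count v < (occIdx v l2 0).length := by
      have h1 := hcnt v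
      rw [occIdx_length]
      simp at h1
      omega
    have hdrop : (occIdx v l2 0).drop (pre.count v)
        = (occIdx v l2 0)[pre.count v] :: (occIdx v l2 0).drop (pre.count v + 1) :=
      List.drop_eq_getElem_cons hlt
    have hstep : bStep (some (d, out)) v
        = some (d.insert v ((occIdx v l2 0).drop (pre.count v + 1)),
            out ++ [(occIdx v l2 0)[pre.count v]]) := by
      simp only [bStep, Option.bind_some, hd v, hdrop]
    rw [List.foldl_cons, hstep]
    obtain ⟨d', hd'⟩ := ih (pre ++ [v]) (d.insert v ((occIdx v l2 0).drop (pre.count v + 1)))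
      (out ++ [(occIdx v l2 0)[pre.count v]])
      (fun w => by have := hcnt w; simpa [List.count_append, List.count_cons] using this)
      (fun w => by
        rw [PySem.Dict.getD_insert]
        by_cases hw : w = v
        · subst hw; simp [List.count_append]
        · have h0 : List.count w (pre ++ [v]) = List.count w pre := by
            have h2 : ¬ v = w := fun e => hw e.symm
            simp [List.count_append, h2]
          rw [if_neg hw, h0]
          exact hd w)
    refine ⟨d', ?_⟩
    rw [hd']
    have hg : PySem.List.pyGetD (occIdx v l2 0) ((pre.count v : Nat) : Int) 0
        = (occIdx v l2 0)[pre.count v] := by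
      rw [PySem.List.pyGetD_natCast, List.getD_eq_getElem _ _ hlt]
    simp [canon, hg]

theorem B_eq_canon (nums1 nums2 : List Int) (h : ∀ v, nums1.count v ≤ nums2.count v) :
    anagramMappings_alt nums1 nums2 = canon nums2 [] nums1 := by
  obtain ⟨d', hd'⟩ := B_loop nums2 nums1 [] (bBuild nums2) []
    (fun v => by simpa using h v)
    (fun v => by simp [bBuild_getD])
  unfold anagramMappings_alt
  rw [hd']
  simp

-- ===== VERDICT (by name: the statement is the Claim_ definition above) =====
theorem anagramMappings_spec : Claim_equal_anagramMappings := by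
  intro nums1 nums2 _ hpre
  unfold Spec_anagramMappings Pre_anagramMappings at *
  have h2 : nums1.length ≤ nums2.length := by
    have := hpre.length_eq
    simp [List.length_take] at this
    omega
  have hcnt : ∀ v, (nums2.take nums1.length).count v = nums1.count v :=
    fun v => hpre.count_eq v
  have hble : ∀ v, nums1.count v ≤ nums2.count v := fun v => by
    have h3 : (nums2.take nums1.length).count v ≤ nums2.count v :=
      (List.take_sublist _ _).count_le v
    have := hcnt v
    omega
  have hrank_lt : ∀ (j : Nat) (hj : j < nums1.length),
      (nums1.take j).count nums1[j] < nums1.count nums1[j] := by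
    intro j hj
    obtain ⟨hr, _⟩ := occIdx_rank nums1 j hj 0
    rwa [occIdx_length] at hr
  obtain ⟨d1, d2, r, hfold, hd1, hd2, hrlen, hr⟩ :=
    A_loop nums1 (nums2.take nums1.length) hcnt nums1.length le_rfl
  unfold anagramMappings
  rw [A_build nums1 nums2 h2 nums1.length le_rfl, List.take_length]
  simp only [List.length_replicate]
  rw [hfold]
  rw [B_eq_canon nums1 nums2 hble]
  apply List.ext_getElem
  · rw [List.length_map, hrlen, canon_length]
  · intro j hj1 hj2
    have hj : j < nums1.length := by rwa [List.length_map, hrlen] at hj1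
    have hcond : nums1.count nums1[j] - (nums1.take nums1.length).count nums1[j]
        ≤ (nums1.take j).count nums1[j] := by
      rw [List.take_length]; omega
    have hrj := hr j hj
    rw [if_pos hcond] at hrj
    have hrget : r[j]'(by omega) = some (PySem.List.pyGetD (occIdx nums1[j] (nums2.take nums1.length) 0)
        (((nums1.take j).count nums1[j] : Nat) : Int) 0) := by
      have := List.getElem?_eq_getElem (l := r) (i := j) (by omega)
      rw [this] at hrj
      exact Option.some_injective _ hrj
    rw [List.getElem_map, hrget]
    rw [canon_getElem nums2 nums1 [] j hj]
    simp only [List.count_nil, Nat.zero_add, Option.getD_some]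
    -- occIdx over nums2 splits as take ++ drop; the index falls in the take part
    have hsplit : occIdx nums1[j] nums2 0
        = occIdx nums1[j] (nums2.take nums1.length) 0
          ++ occIdx nums1[j] (nums2.drop nums1.length) (0 + (nums2.take nums1.length).length) := by
      conv_lhs => rw [← List.take_append_drop nums1.length nums2]
      exact occIdx_append _ _ _ _
    have hlt : (nums1.take j).count nums1[j] < (occIdx nums1[j] (nums2.take nums1.length) 0).length := by
      rw [occIdx_length, hcnt]
      exact hrank_lt j hj
    have hlt2 : (nums1.take j).count nums1[j] < (occIdx nums1[j] nums2 0).length := by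
      rw [hsplit, List.length_append]; omega
    rw [PySem.List.pyGetD_natCast, PySem.List.pyGetD_natCast,
      List.getD_eq_getElem _ _ hlt, List.getD_eq_getElem _ _ hlt2]
    rw [List.getElem_of_eq hsplit hlt2]
    exact (List.getElem_append_left hlt).symm
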